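-- pv_equiv track=rewrite | github.com/afilipch/afp | project_scripts/cgps/crispr_countersilencing.py | get_pams_around_peak
-- ===== SOURCE A (Python) =====
-- def get_pams_around_peak(center, strand, pam_plus, pam_minus, flank, length):
--     start = max(center - flank, 0)
--     stop = center + flank
--     local_plus = pam_plus[start:stop];
--     local_minus = pam_minus[start:stop];
--
--
--     sense = [x[0] + 2 + length - flank for x in enumerate(local_plus) if x[1]==1]
--     antisense = [flank - x[0] - 2 + length for x in enumerate(local_minus) if x[1]==1]
--     sense.append(flank*2)
--     antisense.append(flank*2)
--     if(strand == '-'):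
--         sense, antisense = antisense, sense
--
--     return min(sense, key=lambda x: abs(x)), min(antisense, key=lambda x: abs(x))
-- ===== SOURCE B (Python) =====
-- def get_pams_around_peak(center, strand, pam_plus, pam_minus, flank, length):
--     start = max(center - flank, 0)
--     stop = center + flank
--
--     def nearest_offset(window, pivot, off):
--         # walk outward from the offset-zero pivot (lower index first on ties)
--         # and stop at the first PAM; cap at the neutral offset flank*2
--         n = len(window)
--         if n:
--             q = min(max(pivot, 0), n - 1)
--             for d in range(n):
--                 for g in (q - d, q + d):
--                     if 0 <= g < n and window[g] == 1:
--                         return min((off(g), flank * 2), key=abs)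
--         return flank * 2
--
--     s = nearest_offset(pam_plus[start:stop], flank - length - 2,
--                        lambda g: g + 2 + length - flank)
--     a = nearest_offset(pam_minus[start:stop], flank + length - 2,
--                        lambda g: flank - g - 2 + length)
--     return (a, s) if strand == '-' else (s, a)
-- ===== Notes on version B (the rewrite author's own statement) =====
-- stated objective: alternative
-- what changed: Replaces A's two full-window offset comprehensions plus min(key=abs) scans by a center-outward nearest-PAM search from the offset-zero pivot with early exit, probing the lower index first to preserve min's first-on-tie rule, then capping the found offset at the neutral offset flank*2.
import Mathlib
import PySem

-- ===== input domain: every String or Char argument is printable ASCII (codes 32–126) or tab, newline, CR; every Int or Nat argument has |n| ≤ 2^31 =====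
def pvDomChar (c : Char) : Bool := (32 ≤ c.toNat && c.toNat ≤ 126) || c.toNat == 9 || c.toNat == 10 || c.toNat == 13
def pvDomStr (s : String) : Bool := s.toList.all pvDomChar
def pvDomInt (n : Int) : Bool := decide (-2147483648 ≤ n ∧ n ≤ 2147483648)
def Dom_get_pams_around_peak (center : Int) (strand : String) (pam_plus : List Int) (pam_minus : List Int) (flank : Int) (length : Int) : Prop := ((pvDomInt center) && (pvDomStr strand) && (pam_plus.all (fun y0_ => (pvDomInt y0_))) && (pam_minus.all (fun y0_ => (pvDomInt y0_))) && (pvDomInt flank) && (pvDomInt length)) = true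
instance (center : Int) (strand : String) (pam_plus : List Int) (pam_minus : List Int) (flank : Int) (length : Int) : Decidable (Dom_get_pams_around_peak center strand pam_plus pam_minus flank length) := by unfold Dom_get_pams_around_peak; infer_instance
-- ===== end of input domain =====

-- B replaces A's two offset comprehensions + min(key=abs) scans by a center-outward
-- nearest-PAM search in each window with early exit (alternative algorithm).

-- ===== PORT A =====
def get_pams_around_peak (center : Int) (strand : String) (pam_plus : List Int) (pam_minus : List Int) (flank : Int) (length : Int) : Int × Int :=
  let start := max (center - flank) 0
  let stop := center + flank
  let local_plus := PySem.List.slice pam_plus (some start) (some stop)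
  let local_minus := PySem.List.slice pam_minus (some start) (some stop)
  let sense := ((PySem.List.enumerate local_plus 0).filter (fun x => x.2 == 1)).map
      (fun x => x.1 + 2 + length - flank) ++ [flank * 2]
  let antisense := ((PySem.List.enumerate local_minus 0).filter (fun x => x.2 == 1)).map
      (fun x => flank - x.1 - 2 + length) ++ [flank * 2]
  let p := if strand == "-" then (antisense, sense) else (sense, antisense)
  ((PySem.List.min? p.1 (fun x => |x|)).getD 0, (PySem.List.min? p.2 (fun x => |x|)).getD 0)

-- ===== PORT B =====
-- the outward walk: at distance d try q-d first (lower index), then q+d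
def pvProbe (w : List Int) (q : Int) : Nat → Int → Option Int
  | 0, _ => none
  | fuel + 1, d =>
    if (0 ≤ q - d ∧ q - d < (w.length : Int)) ∧ w.getD (q - d).toNat 0 = 1 then some (q - d)
    else if (0 ≤ q + d ∧ q + d < (w.length : Int)) ∧ w.getD (q + d).toNat 0 = 1 then some (q + d)
    else pvProbe w q fuel (d + 1)

def pvNearestOffset (w : List Int) (flank pivot : Int) (off : Int → Int) : Int :=
  let n : Int := w.length
  if n ≠ 0 then
    match pvProbe w (min (max pivot 0) (n - 1)) w.length 0 with
    | some g => (PySem.List.min? [off g, flank * 2] (fun x => |x|)).getD 0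
    | none => flank * 2
  else flank * 2

def get_pams_around_peak_alt (center : Int) (strand : String) (pam_plus : List Int) (pam_minus : List Int) (flank : Int) (length : Int) : Int × Int :=
  let start := max (center - flank) 0
  let stop := center + flank
  let s := pvNearestOffset (PySem.List.slice pam_plus (some start) (some stop)) flank
      (flank - length - 2) (fun g => g + 2 + length - flank)
  let a := pvNearestOffset (PySem.List.slice pam_minus (some start) (some stop)) flank
      (flank + length - 2) (fun g => flank - g - 2 + length)
  if strand == "-" then (a, s) else (s, a)

-- ===== PRECONDITION & SPEC =====
def Spec_get_pams_around_peak (center : Int) (strand : String) (pam_plus : List Int) (pam_minus : List Int) (flank : Int) (length : Int) (out : Int × Int) : Prop := out = get_pams_around_peak_alt center strand pam_plus pam_minus flank length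
instance (center : Int) (strand : String) (pam_plus : List Int) (pam_minus : List Int) (flank : Int) (length : Int) (out : Int × Int) : Decidable (Spec_get_pams_around_peak center strand pam_plus pam_minus flank length out) := by unfold Spec_get_pams_around_peak; infer_instance

-- ===== CLAIM (what is proved, stated in full; the proofs are below) =====
def Claim_equal_get_pams_around_peak : Prop := ∀ (center : Int) (strand : String) (pam_plus : List Int) (pam_minus : List Int) (flank : Int) (length : Int), Dom_get_pams_around_peak center strand pam_plus pam_minus flank length → Spec_get_pams_around_peak center strand pam_plus pam_minus flank length (get_pams_around_peak center strand pam_plus pam_minus flank length)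

-- ===== LEMMAS AND PROOFS =====

-- a qualifying position of the window: in range and holding a 1
def pvP (w : List Int) (g : Int) : Prop := 0 ≤ g ∧ g < (w.length : Int) ∧ w.getD g.toNat 0 = 1

-- soundness of the outward walk: a hit is a qualifying position nearest to q, lower index on ties
theorem pvProbe_sound (w : List Int) (q : Int) :
    ∀ (fuel : Nat) (d : Int), 0 ≤ d →
    (∀ j, pvP w j → d ≤ ((j - q).natAbs : Int)) →
    ∀ g, pvProbe w q fuel d = some g →
      pvP w g ∧ ∀ j, pvP w j →
        ((g - q).natAbs < (j - q).natAbs ∨ ((g - q).natAbs = (j - q).natAbs ∧ g ≤ j)) := by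
  intro fuel
  induction fuel with
  | zero => intro d _ _ g h; simp [pvProbe] at h
  | succ fuel ih =>
    intro d hd hinv g h
    rw [pvProbe] at h
    split_ifs at h with h1 h2
    · cases h
      refine ⟨⟨h1.1.1, h1.1.2, h1.2⟩, ?_⟩
      intro j hj
      have h4 := hinv j hj
      omega
    · cases h
      refine ⟨⟨h2.1.1, h2.1.2, h2.2⟩, ?_⟩
      intro j hj
      obtain ⟨hj1, hj2, hj3⟩ := hj
      have h4 := hinv j ⟨hj1, hj2, hj3⟩
      by_cases e1 : j = q - d
      · exact absurd ⟨⟨by omega, by omega⟩, by rw [← e1]; exact hj3⟩ h1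
      · omega
    · refine ih (d + 1) (by omega) ?_ g h
      intro j hj
      obtain ⟨hj1, hj2, hj3⟩ := hj
      have h4 := hinv j ⟨hj1, hj2, hj3⟩
      by_cases e1 : j = q - d
      · exact absurd ⟨⟨by omega, by omega⟩, by rw [← e1]; exact hj3⟩ h1
      · by_cases e2 : j = q + d
        · exact absurd ⟨⟨by omega, by omega⟩, by rw [← e2]; exact hj3⟩ h2
        · omega

-- completeness: with enough fuel, none means no qualifying position at all
theorem pvProbe_none (w : List Int) (q : Int) (hq1 : 0 ≤ q) (hq2 : q < (w.length : Int)) :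
    ∀ (fuel : Nat) (d : Int), 0 ≤ d → (w.length : Int) ≤ (fuel : Int) + d →
    (∀ j, pvP w j → d ≤ ((j - q).natAbs : Int)) →
    pvProbe w q fuel d = none → ∀ j, ¬ pvP w j := by
  intro fuel
  induction fuel with
  | zero =>
    intro d hd hfu hinv _ j hj
    obtain ⟨hj1, hj2, hj3⟩ := hj
    have h4 := hinv j ⟨hj1, hj2, hj3⟩
    omega
  | succ fuel ih =>
    intro d hd hfu hinv hnone j hj
    rw [pvProbe] at hnone
    split_ifs at hnone with h1 h2
    refine ih (d + 1) (by omega) (by push_cast at hfu ⊢; omega) ?_ hnone j hj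
    intro j' hj'
    obtain ⟨hj1, hj2, hj3⟩ := hj'
    have h4 := hinv j' ⟨hj1, hj2, hj3⟩
    by_cases e1 : j' = q - d
    · exact absurd ⟨⟨by omega, by omega⟩, by rw [← e1]; exact hj3⟩ h1
    · by_cases e2 : j' = q + d
      · exact absurd ⟨⟨by omega, by omega⟩, by rw [← e2]; exact hj3⟩ h2
      · omega

-- Python's min(xs, key=abs) as a fold keeping the first minimum
def pvStep : Option Int → Int → Option Int := fun acc x =>
  match acc with
  | none => some x
  | some m => if |x| < |m| then some x else some m

theorem min?_abs_eq_foldl (xs : List Int) :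
    PySem.List.min? xs (fun x => |x|) = xs.foldl pvStep none := by
  unfold PySem.List.min? pvStep
  congr 1
  funext acc x
  cases acc <;> rfl

def pvBestIdx (F : Int → Int) (a : Int) (Q : List Int) : Int :=
  Q.foldl (fun m g => if |F g| < |F m| then g else m) a

theorem foldl_step_map (F : Int → Int) :
    ∀ (Q : List Int) (a : Int), (Q.map F).foldl pvStep (some (F a)) = some (F (pvBestIdx F a Q)) := by
  intro Q
  induction Q with
  | nil => intro a; simp [pvBestIdx]
  | cons g Q ih =>
    intro a
    have hstep : pvStep (some (F a)) (F g) = some (F (if |F g| < |F a| then g else a)) := by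
      simp only [pvStep, apply_ite (f := F), apply_ite (f := @some Int)]
    simp only [List.map_cons, List.foldl_cons, hstep, ih]
    simp [pvBestIdx]

-- on a strictly increasing index list, the first minimum by |F ·| dominates every element,
-- and on ties it is the smaller index
theorem pvBestIdx_spec (F : Int → Int) :
    ∀ (Q : List Int) (a : Int), List.Pairwise (· < ·) (a :: Q) →
      pvBestIdx F a Q ∈ a :: Q ∧
      ∀ y ∈ a :: Q, |F (pvBestIdx F a Q)| < |F y| ∨ (|F (pvBestIdx F a Q)| = |F y| ∧ pvBestIdx F a Q ≤ y) := by
  intro Q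
  induction Q with
  | nil =>
    intro a _
    refine ⟨by simp [pvBestIdx], ?_⟩
    intro y hy
    simp only [List.mem_singleton] at hy
    subst hy
    exact Or.inr ⟨rfl, by simp [pvBestIdx]⟩
  | cons g Q ih =>
    intro a hp
    obtain ⟨hmem1, hp2⟩ := List.pairwise_cons.mp hp
    obtain ⟨hmem2, hp3⟩ := List.pairwise_cons.mp hp2
    have hag : a < g := hmem1 g (List.mem_cons_self)
    by_cases hc : |F g| < |F a|
    · have hstep : pvBestIdx F a (g :: Q) = pvBestIdx F g Q := by
        simp [pvBestIdx, if_pos hc]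
      have hp' : List.Pairwise (· < ·) (g :: Q) := hp2
      obtain ⟨hrmem, hrdom⟩ := ih g hp'
      rw [hstep]
      have hdomG := hrdom g List.mem_cons_self
      refine ⟨?_, ?_⟩
      · rcases List.mem_cons.mp hrmem with h | h
        · rw [h]; exact List.mem_cons_of_mem _ List.mem_cons_self
        · exact List.mem_cons_of_mem _ (List.mem_cons_of_mem _ h)
      · intro y hy
        rcases List.mem_cons.mp hy with h | h
        · rw [h]
          left
          rcases hdomG with h' | ⟨h', _⟩
          · exact lt_trans h' hc
          · exact h' ▸ hc
        · exact hrdom y h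
    · have hstep : pvBestIdx F a (g :: Q) = pvBestIdx F a Q := by
        simp [pvBestIdx, if_neg hc]
      have hp' : List.Pairwise (· < ·) (a :: Q) := by
        refine List.pairwise_cons.mpr ⟨?_, hp3⟩
        intro y hy
        exact hmem1 y (List.mem_cons_of_mem _ hy)
      obtain ⟨hrmem, hrdom⟩ := ih a hp'
      rw [hstep]
      have hdomA := hrdom a List.mem_cons_self
      push Not at hc
      refine ⟨?_, ?_⟩
      · rcases List.mem_cons.mp hrmem with h | h
        · rw [h]; exact List.mem_cons_self
        · exact List.mem_cons_of_mem _ (List.mem_cons_of_mem _ h)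
      · intro y hy
        rcases List.mem_cons.mp hy with h | h
        · rw [h]; exact hdomA
        · rcases List.mem_cons.mp h with h | h
          · rw [h]
            rcases hdomA with h' | ⟨h', hle⟩
            · exact Or.inl (lt_of_lt_of_le h' hc)
            · rcases lt_or_eq_of_le hc with hlt | heq
              · exact Or.inl (h' ▸ hlt)
              · exact Or.inr ⟨h' ▸ heq, le_of_lt (lt_of_le_of_lt hle hag)⟩
          · exact hrdom y (List.mem_cons_of_mem _ h)

-- one window, one strand: A's min-by-abs over the offset comprehension (plus sentinel)
-- equals B's cap of the offset at the outward-nearest PAM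
theorem component_eq (L : List Int) (flank p : Int) (F : Int → Int)
    (hF : ∀ g, (F g).natAbs = (g - p).natAbs) :
    ((PySem.List.min? ((((PySem.List.enumerate L 0).filter (fun x => x.2 == 1)).map
        (fun x => F x.1)) ++ [flank * 2]) (fun x => |x|)).getD 0)
      = pvNearestOffset L flank p F := by
  rw [pvNearestOffset]
  by_cases hnil : L = []
  · subst hnil
    rw [min?_abs_eq_foldl]
    simp [pvStep, PySem.List.enumerate]
  · have hpos : 0 < L.length := List.length_pos_iff.mpr hnil
    have hne : (L.length : Int) ≠ 0 := by exact_mod_cast Nat.pos_iff_ne_zero.mp hpos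
    rw [if_pos hne]
    set Qf := (PySem.List.enumerate L 0).filter (fun x => x.2 == 1) with hQf
    set Q := Qf.map (fun x => x.1) with hQ
    have hmapQ : Qf.map (fun x => F x.1) = Q.map F := by
      rw [hQ, List.map_map]; rfl
    have hQmem : ∀ i : Int, i ∈ Q ↔ ∃ (k : Nat) (hk : k < L.length), i = (k : Int) ∧ L[k] = 1 := by
      intro i
      rw [hQ, List.mem_map]
      constructor
      · rintro ⟨x, hx, rfl⟩
        rw [hQf, List.mem_filter] at hx
        obtain ⟨hx1, hx2⟩ := hx
        rw [PySem.List.mem_enumerate_iff] at hx1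
        obtain ⟨k, hk, rfl⟩ := hx1
        refine ⟨k, hk, by simp, ?_⟩
        simpa using hx2
      · rintro ⟨k, hk, rfl, hv⟩
        refine ⟨((k : Int), L[k]), ?_, rfl⟩
        rw [hQf, List.mem_filter]
        constructor
        · rw [PySem.List.mem_enumerate_iff]
          exact ⟨k, hk, by simp⟩
        · simpa using hv
    have hQpair : List.Pairwise (· < ·) Q := by
      have h1 : (PySem.List.enumerate L 0).Pairwise (fun p q => p.1 < q.1) :=
        PySem.List.pairwise_lt_enumerate L 0
      exact ((h1.filter _).map _ (fun a b h => h))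
    have hgetD : ∀ (k : Nat) (hk : k < L.length), L.getD k 0 = L[k] := by
      intro k hk
      rw [List.getD_eq_getElem?_getD, List.getElem?_eq_getElem hk]
      rfl
    have hPQ : ∀ i : Int, i ∈ Q → pvP L i := by
      intro i hi'
      rw [hQmem] at hi'
      obtain ⟨k, hk, rfl, hv⟩ := hi'
      refine ⟨by positivity, by exact_mod_cast hk, ?_⟩
      rw [show ((k : Int)).toNat = k from Int.toNat_natCast k, hgetD k hk]
      simpa using hv
    have hQP : ∀ g : Int, pvP L g → g ∈ Q := by
      intro g hg
      obtain ⟨hg1, hg2, hg3⟩ := hg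
      rw [hQmem]
      refine ⟨g.toNat, by omega, by omega, ?_⟩
      rw [hgetD g.toNat (by omega)] at hg3
      exact hg3
    set q := min (max p 0) ((L.length : Int) - 1) with hq
    have hq1 : 0 ≤ q := by omega
    have hq2 : q < (L.length : Int) := by omega
    cases hres : pvProbe L q L.length 0 with
    | none =>
      have hnoP := pvProbe_none L q hq1 hq2 L.length 0 le_rfl (by omega)
        (fun j _ => by positivity) hres
      have hQnil : Q = [] := by
        cases hQe : Q with
        | nil => rfl
        | cons a t => exact absurd (hPQ a (hQe ▸ List.mem_cons_self)) (hnoP a)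
      have hQfnil : Qf = [] := by
        cases hQfe : Qf with
        | nil => rfl
        | cons x t =>
          have : x.1 ∈ Q := by rw [hQ, hQfe]; simp
          rw [hQnil] at this
          simp at this
      rw [hQfnil]
      rw [min?_abs_eq_foldl]
      simp [pvStep]
    | some gstar =>
      obtain ⟨hgP, hgdom⟩ := pvProbe_sound L q L.length 0 le_rfl
        (fun j _ => by positivity) gstar hres
      have hgQ : gstar ∈ Q := hQP gstar hgP
      obtain ⟨a, t, hQe⟩ : ∃ a t, Q = a :: t := by
        cases hQe : Q with
        | nil => rw [hQe] at hgQ; simp at hgQ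
        | cons a t => exact ⟨a, t, rfl⟩
      rw [min?_abs_eq_foldl, List.foldl_append]
      rw [hmapQ, hQe, List.map_cons]
      simp only [List.foldl_cons, List.foldl_nil]
      have hfirst : pvStep none (F a) = some (F a) := rfl
      rw [hfirst, foldl_step_map F t a]
      set r := pvBestIdx F a t with hr
      obtain ⟨hrmem, hrdom⟩ := pvBestIdx_spec F t a (hQe ▸ hQpair)
      have hreq : r = gstar := by
        have hrQ : r ∈ Q := hQe ▸ hrmem
        have hrP := hPQ r hrQ
        have h1 := hgdom r hrP
        have h2 := hrdom gstar (hQe ▸ hgQ)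
        obtain ⟨hg1, hg2, _⟩ := hgP
        obtain ⟨hr1, hr2, _⟩ := hrP
        simp only [Int.abs_eq_natAbs] at h2
        rw [hF, hF] at h2
        omega
      rw [hreq]
      rw [min?_abs_eq_foldl]
      simp only [List.foldl_cons, List.foldl_nil]
      rfl

-- canonical forms of the two offset maps
def pvFs (flank length : Int) : Int → Int := fun g => g + 2 + length - flank
def pvFa (flank length : Int) : Int → Int := fun g => flank - g - 2 + length

-- ===== VERDICT (by name: the statement is the Claim_ definition above) =====
theorem get_pams_around_peak_spec : Claim_equal_get_pams_around_peak := by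
  intro center strand pam_plus pam_minus flank length _
  unfold Spec_get_pams_around_peak
  simp only [get_pams_around_peak, get_pams_around_peak_alt]
  have hfun1 : (fun x : Int × Int => x.1 + 2 + length - flank)
      = (fun x : Int × Int => pvFs flank length x.1) := rfl
  have hfun2 : (fun x : Int × Int => flank - x.1 - 2 + length)
      = (fun x : Int × Int => pvFa flank length x.1) := rfl
  have hoff1 : (fun g : Int => g + 2 + length - flank) = pvFs flank length := rfl
  have hoff2 : (fun g : Int => flank - g - 2 + length) = pvFa flank length := rfl
  have e1 := component_eq
      (PySem.List.slice pam_plus (some (max (center - flank) 0)) (some (center + flank)))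
      flank (flank - length - 2) (pvFs flank length)
      (by intro g; simp only [pvFs]; omega)
  have e2 := component_eq
      (PySem.List.slice pam_minus (some (max (center - flank) 0)) (some (center + flank)))
      flank (flank + length - 2) (pvFa flank length)
      (by intro g; simp only [pvFa]; omega)
  rw [hfun1, hfun2, hoff1, hoff2]
  by_cases hs : (strand == "-") = true
  · simp only [hs, if_pos]
    rw [e1, e2]
  · simp only [hs, Bool.false_eq_true, ite_false]
    rw [e1, e2]
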